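-- pv_equiv track=rewrite | github.com/dataelement/bisheng-rt | src/backends/dataelem_python_backend/src/alg/ellm.py | split_for_ellm
-- ===== SOURCE A (Python) =====
-- def split_for_ellm(bboxes, texts, schema, max_seq_len=512):
--     max_prompt_len = max([len(key) for key in schema])
--     summary_token_num = 4  # [CLS] + [SEP] + [SEP] + [SEP]
--     max_content_len = max_seq_len - max_prompt_len - summary_token_num
--
--     bboxes_start = []
--     start_index = 0
--     bboxes_start.append(0)
--     for text in texts:
--         start_index += len(text)
--         bboxes_start.append(start_index)
--
--     split_texts = []
--     split_bboxes = []
--     split_range = []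
--     each_fragment_text = []
--     each_fragment_bbox = []
--     max_len = max_content_len
--     for index, text in enumerate(texts):
--         if bboxes_start[index] + len(text) > max_len:
--             # 当前box文本累加长度超出max_len，切分到上一个box
--             split_texts.append(each_fragment_text)
--             split_bboxes.append(each_fragment_bbox)
--             fragment_text_len = len(''.join(each_fragment_text))
--             split_range.append((max_len - max_content_len,
--                                 max_len - max_content_len + fragment_text_len))
--             max_len += fragment_text_len
--             each_fragment_text = []
--             each_fragment_bbox = []
--         each_fragment_text.append(text)
--         each_fragment_bbox.append(bboxes[index])
--     split_texts.append(each_fragment_text)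
--     split_bboxes.append(each_fragment_bbox)
--     fragment_text_len = len(''.join(each_fragment_text))
--     split_range.append((max_len - max_content_len,
--                         max_len - max_content_len + fragment_text_len))
--     return split_bboxes, split_texts, split_range
-- ===== SOURCE B (Python) =====
-- def split_for_ellm(bboxes, texts, schema, max_seq_len=512):
--     # Boundary pass: record fragment cuts (index range + char range), then slice.
--     cap = max_seq_len - max(len(k) for k in schema) - 4
--     cuts = []
--     cum = 0    # chars seen so far
--     off = 0    # char offset where the current fragment started
--     start = 0  # index where the current fragment started
--     for i, t in enumerate(texts):
--         if cum + len(t) > off + cap: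
--             cuts.append((start, i, off, cum))
--             start, off = i, cum
--         cum += len(t)
--     cuts.append((start, len(texts), off, cum))
--     split_bboxes = [bboxes[a:b] for a, b, _, _ in cuts]
--     split_texts = [texts[a:b] for a, b, _, _ in cuts]
--     split_range = [(c, d) for _, _, c, d in cuts]
--     return split_bboxes, split_texts, split_range
-- ===== Notes on version B (the rewrite author's own statement) =====
-- stated objective: simpler
-- what changed: B replaces A's precomputed prefix-sum table (bboxes_start), mutated max_len accumulator and incrementally grown fragment lists with a single boundary pass that records cut tuples (index range, char range) over running counters, then builds all three outputs by slicing texts/bboxes per cut.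
import Mathlib
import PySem

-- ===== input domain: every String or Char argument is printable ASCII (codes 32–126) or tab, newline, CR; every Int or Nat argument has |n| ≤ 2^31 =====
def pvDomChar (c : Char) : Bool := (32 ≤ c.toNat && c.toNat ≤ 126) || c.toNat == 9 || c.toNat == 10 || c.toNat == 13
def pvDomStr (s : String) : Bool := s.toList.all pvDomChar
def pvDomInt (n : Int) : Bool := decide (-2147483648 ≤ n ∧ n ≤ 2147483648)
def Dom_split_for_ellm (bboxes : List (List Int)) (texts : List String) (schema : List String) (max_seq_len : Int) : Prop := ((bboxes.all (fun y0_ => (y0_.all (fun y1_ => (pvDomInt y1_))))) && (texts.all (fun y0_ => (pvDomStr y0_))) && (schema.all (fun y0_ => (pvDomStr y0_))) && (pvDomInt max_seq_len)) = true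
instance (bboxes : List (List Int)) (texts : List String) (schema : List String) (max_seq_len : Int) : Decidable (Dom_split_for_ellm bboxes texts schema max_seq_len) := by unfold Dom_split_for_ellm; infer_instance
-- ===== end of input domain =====

-- B replaces A's prefix-sum table and mutated max_len accumulator by one boundary pass that
-- records index/char cut ranges and then slices; objective: simpler. Return value only.

-- ===== PORT A =====
-- bboxes_start list: [0] followed by running character totals
def aStarts (texts : List String) : List Int :=
  (texts.foldl
    (fun (acc : List Int × Int) t =>
      (acc.1 ++ [acc.2 + PySem.Str.len t], acc.2 + PySem.Str.len t))
    ([0], 0)).1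

-- the 'for index, text in enumerate(texts)' loop; state (split_bboxes, split_texts, split_range,
-- each_fragment_text, each_fragment_bbox, max_len)
def aLoop (bboxes : List (List Int)) (bstart : List Int) (cap : Int) :
    List (Int × String) →
    (List (List (List Int)) × List (List String) × List (Int × Int) × List String × List (List Int) × Int) →
    (List (List (List Int)) × List (List String) × List (Int × Int) × List String × List (List Int) × Int)
  | [], st => st
  | (i, t) :: rest, (sb, stx, sr, eft, efb, ml) =>
    if (PySem.List.pyGet? bstart i).getD 0 + PySem.Str.len t > ml then
      let fl := PySem.Str.len (PySem.Str.join "" eft)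
      aLoop bboxes bstart cap rest
        (sb ++ [efb], stx ++ [eft], sr ++ [(ml - cap, ml - cap + fl)],
         [t], [(PySem.List.pyGet? bboxes i).getD []], ml + fl)
    else
      aLoop bboxes bstart cap rest
        (sb, stx, sr, eft ++ [t], efb ++ [(PySem.List.pyGet? bboxes i).getD []], ml)

def split_for_ellm (bboxes : List (List Int)) (texts : List String) (schema : List String) (max_seq_len : Int) : List (List (List Int)) × List (List String) × (List (Int × Int)) :=
  let max_prompt_len := (PySem.List.max? (schema.map (fun k => PySem.Str.len k)) (fun y => y)).getD 0
  let max_content_len := max_seq_len - max_prompt_len - 4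
  let st := aLoop bboxes (aStarts texts) max_content_len (PySem.List.enumerate texts 0)
    ([], [], [], [], [], max_content_len)
  let fl := PySem.Str.len (PySem.Str.join "" st.2.2.2.1)
  (st.1 ++ [st.2.2.2.2.1], st.2.1 ++ [st.2.2.2.1],
   st.2.2.1 ++ [(st.2.2.2.2.2 - max_content_len, st.2.2.2.2.2 - max_content_len + fl)])

-- ===== PORT B =====
-- boundary pass: state (cuts, cum, off, start); a cut is (start_idx, end_idx, char_start, char_end)
def bLoop (cap : Int) :
    List (Int × String) →
    (List (Int × Int × Int × Int) × Int × Int × Int) →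
    (List (Int × Int × Int × Int) × Int × Int × Int)
  | [], st => st
  | (i, t) :: rest, (cuts, cum, off, start) =>
    if cum + PySem.Str.len t > off + cap then
      bLoop cap rest (cuts ++ [(start, i, off, cum)], cum + PySem.Str.len t, cum, i)
    else
      bLoop cap rest (cuts, cum + PySem.Str.len t, off, start)

def split_for_ellm_alt (bboxes : List (List Int)) (texts : List String) (schema : List String) (max_seq_len : Int) : List (List (List Int)) × List (List String) × (List (Int × Int)) :=
  let cap := max_seq_len - (PySem.List.max? (schema.map (fun k => PySem.Str.len k)) (fun y => y)).getD 0 - 4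
  let st := bLoop cap (PySem.List.enumerate texts 0) ([], 0, 0, 0)
  let cuts := st.1 ++ [(st.2.2.2, (texts.length : Int), st.2.2.1, st.2.1)]
  (cuts.map (fun c => PySem.List.slice bboxes (some c.1) (some c.2.1)),
   cuts.map (fun c => PySem.List.slice texts (some c.1) (some c.2.1)),
   cuts.map (fun c => (c.2.2.1, c.2.2.2)))

-- ===== PRECONDITION & SPEC =====
-- Pre_ excludes exactly the inputs where A raises: empty schema (max of an empty list,
-- ValueError) and texts longer than bboxes (IndexError on bboxes[index]).
def Pre_split_for_ellm (bboxes : List (List Int)) (texts : List String) (schema : List String) (max_seq_len : Int) : Prop :=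
  schema ≠ [] ∧ texts.length ≤ bboxes.length
instance (bboxes : List (List Int)) (texts : List String) (schema : List String) (max_seq_len : Int) : Decidable (Pre_split_for_ellm bboxes texts schema max_seq_len) := by unfold Pre_split_for_ellm; infer_instance

def pvWitness_split_for_ellm : List (List Int) × List String × List String × Int :=
  ([[1,2,3,4],[5,6,7,8],[9,9,9,9]], ["ab", "cde", "f"], ["name", "id"], 10)

def Spec_split_for_ellm (bboxes : List (List Int)) (texts : List String) (schema : List String) (max_seq_len : Int) (out : List (List (List Int)) × List (List String) × (List (Int × Int))) : Prop := out = split_for_ellm_alt bboxes texts schema max_seq_len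
instance (bboxes : List (List Int)) (texts : List String) (schema : List String) (max_seq_len : Int) (out : List (List (List Int)) × List (List String) × (List (Int × Int))) : Decidable (Spec_split_for_ellm bboxes texts schema max_seq_len out) := by unfold Spec_split_for_ellm; infer_instance

-- ===== CLAIM (what is proved, stated in full; the proofs are below) =====
def Claim_equal_split_for_ellm : Prop := ∀ (bboxes : List (List Int)) (texts : List String) (schema : List String) (max_seq_len : Int), Dom_split_for_ellm bboxes texts schema max_seq_len → Pre_split_for_ellm bboxes texts schema max_seq_len → Spec_split_for_ellm bboxes texts schema max_seq_len (split_for_ellm bboxes texts schema max_seq_len)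


-- ===== LEMMAS AND PROOFS =====

-- running character totals from offset s
def tailStarts (s : Int) : List String → List Int
  | [] => []
  | t :: ts => (s + PySem.Str.len t) :: tailStarts (s + PySem.Str.len t) ts

theorem aStarts_fold (ts : List String) (acc : List Int) (s : Int) :
    (ts.foldl
      (fun (acc : List Int × Int) t =>
        (acc.1 ++ [acc.2 + PySem.Str.len t], acc.2 + PySem.Str.len t)) (acc, s)).1
    = acc ++ tailStarts s ts := by
  induction ts generalizing acc s with
  | nil => simp [tailStarts]
  | cons t ts ih =>
    simp only [List.foldl_cons]
    rw [ih]
    simp [tailStarts]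

theorem aStarts_eq (texts : List String) : aStarts texts = [0] ++ tailStarts 0 texts := by
  simpa [aStarts] using aStarts_fold texts [0] 0

theorem inter_len : ∀ (L : List (List Char)), (List.intercalate [] L).length = (L.map List.length).sum := by
  intro L
  induction L with
  | nil => simp [List.intercalate]
  | cons a L ih =>
    cases L with
    | nil => simp [List.intercalate]
    | cons b L =>
      simp only [List.intercalate, List.intersperse] at *
      simp_all

theorem len_join_append (l : List String) (t : String) :
    PySem.Str.len (PySem.Str.join "" (l ++ [t]))
      = PySem.Str.len (PySem.Str.join "" l) + PySem.Str.len t := by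
  simp [PySem.Str.len_eq, PySem.Str.toList_join, PySem.Chars.join, inter_len]

theorem len_join_singleton (t : String) :
    PySem.Str.len (PySem.Str.join "" [t]) = PySem.Str.len t := by
  simp [PySem.Str.len_eq, PySem.Str.toList_join, PySem.Chars.join, inter_len]

theorem take_snoc {α : Type} (xs : List α) (s i : Nat) (y : α) (ys : List α)
    (hs : s ≤ i) (hd : xs.drop i = y :: ys) :
    (xs.drop s).take (i - s) ++ [y] = (xs.drop s).take (i + 1 - s) := by
  have h1 : i + 1 - s = (i - s) + 1 := by omega
  rw [h1, List.take_add_one]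
  have h2 : (xs.drop s)[i - s]? = xs[i]? := by
    rw [List.getElem?_drop]
    congr 1
    omega
  have h3 : xs[i]? = some y := by
    have h4 : (xs.drop i)[0]? = xs[i + 0]? := List.getElem?_drop
    simp [hd] at h4
    simpa using h4.symm
  rw [h2, h3]
  simp

-- the main loop invariant
theorem loop_eq (rest : List String) :
    ∀ (bboxes : List (List Int)) (texts : List String) (cap : Int)
      (pre : List Int) (i s : Nat) (cum off : Int)
      (cuts : List (Int × Int × Int × Int)) (eft : List String) (efb : List (List Int)),
    texts.drop i = rest →
    i ≤ texts.length →
    texts.length ≤ bboxes.length →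
    s ≤ i →
    pre.length = i →
    aStarts texts = pre ++ cum :: tailStarts cum rest →
    eft = (texts.drop s).take (i - s) →
    efb = (bboxes.drop s).take (i - s) →
    PySem.Str.len (PySem.Str.join "" eft) = cum - off →
    (let st := aLoop bboxes (aStarts texts) cap (PySem.List.enumerate rest (i : Int))
        (cuts.map (fun c => PySem.List.slice bboxes (some c.1) (some c.2.1)),
         cuts.map (fun c => PySem.List.slice texts (some c.1) (some c.2.1)),
         cuts.map (fun c => (c.2.2.1, c.2.2.2)), eft, efb, cap + off)
     (st.1 ++ [st.2.2.2.2.1], st.2.1 ++ [st.2.2.2.1],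
      st.2.2.1 ++ [(st.2.2.2.2.2 - cap, st.2.2.2.2.2 - cap + PySem.Str.len (PySem.Str.join "" st.2.2.2.1))]))
    = (let st := bLoop cap (PySem.List.enumerate rest (i : Int)) (cuts, cum, off, (s : Int))
       let cuts' := st.1 ++ [(st.2.2.2, (texts.length : Int), st.2.2.1, st.2.1)]
       (cuts'.map (fun c => PySem.List.slice bboxes (some c.1) (some c.2.1)),
        cuts'.map (fun c => PySem.List.slice texts (some c.1) (some c.2.1)),
        cuts'.map (fun c => (c.2.2.1, c.2.2.2)))) := by
  induction rest with
  | nil =>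
    intro bboxes texts cap pre i s cum off cuts eft efb hdrop hi hb hs hpre hbs heft hefb hfl
    have hil : i = texts.length := by
      have hld := List.length_drop (l := texts) (i := i)
      rw [hdrop] at hld
      simp at hld
      omega
    subst heft hefb hil
    simp only [PySem.List.enumerate_nil, aLoop, bLoop, List.map_append, List.map_cons,
      List.map_nil, PySem.List.slice_natCast]
    rw [hfl]
    have e1 : cap + off - cap = off := by ring
    have e2 : off + (cum - off) = cum := by ring
    simp [e1, e2]
  | cons t rest ih =>
    intro bboxes texts cap pre i s cum off cuts eft efb hdrop hi hb hs hpre hbs heft hefb hfl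
    have hilt : i < texts.length := by
      have hld := List.length_drop (l := texts) (i := i)
      rw [hdrop] at hld
      simp at hld
      omega
    have hilb : i < bboxes.length := by omega
    have hti : texts[i]? = some t := by
      have h4 : (texts.drop i)[0]? = texts[i + 0]? := List.getElem?_drop
      rw [hdrop] at h4
      simpa using h4.symm
    have hbi : (PySem.List.pyGet? (aStarts texts) (i : Int)).getD 0 = cum := by
      rw [hbs, PySem.List.pyGet?_natCast, List.getElem?_append_right (by omega)]
      simp [hpre]
    have hbb : (PySem.List.pyGet? bboxes (i : Int)).getD [] = bboxes[i] := by
      rw [PySem.List.pyGet?_natCast, List.getElem?_eq_getElem hilb]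
      rfl
    have hcast : ((i : Int) + 1) = ((i + 1 : Nat) : Int) := by push_cast; ring
    have hd1 : texts.drop (i + 1) = rest := by
      have hdd : texts.drop (i + 1) = (texts.drop i).drop 1 := by rw [List.drop_drop]
      rw [hdd, hdrop]
      simp
    simp only [PySem.List.enumerate_cons, aLoop, bLoop, hbi, hbb, hcast]
    have e1 : off + cap = cap + off := by ring
    rw [e1]
    split_ifs with hc
    · -- cut at index i
      rw [hfl]
      have e2 : cap + off - cap = off := by ring
      have e3 : off + (cum - off) = cum := by ring
      have e4 : cap + off + (cum - off) = cap + cum := by ring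
      rw [e2, e3, e4]
      have hnew : cuts.map (fun c => PySem.List.slice bboxes (some c.1) (some c.2.1)) ++ [efb]
          = (cuts ++ [((s : Int), (i : Int), off, cum)]).map
              (fun c => PySem.List.slice bboxes (some c.1) (some c.2.1)) := by
        simp [PySem.List.slice_natCast, hefb]
      have hnew2 : cuts.map (fun c => PySem.List.slice texts (some c.1) (some c.2.1)) ++ [eft]
          = (cuts ++ [((s : Int), (i : Int), off, cum)]).map
              (fun c => PySem.List.slice texts (some c.1) (some c.2.1)) := by
        simp [PySem.List.slice_natCast, heft]
      rw [hnew, hnew2]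
      rw [show (cuts.map (fun c => ((c.2.2.1 : Int), (c.2.2.2 : Int))) ++ [((off : Int), (cum : Int))])
          = (cuts ++ [((s : Int), (i : Int), off, cum)]).map (fun c => (c.2.2.1, c.2.2.2)) by simp]
      exact ih bboxes texts cap (pre ++ [cum]) (i + 1) i (cum + PySem.Str.len t) cum
        (cuts ++ [((s : Int), (i : Int), off, cum)]) [t] [bboxes[i]]
        hd1
        (by omega) hb (by omega) (by simp [hpre])
        (by rw [hbs]; simp [tailStarts])
        (by rw [show i + 1 - i = 1 from by omega, hdrop]; rfl)
        (by rw [show i + 1 - i = 1 from by omega, List.drop_eq_getElem_cons hilb]; rfl)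
        (by rw [len_join_singleton]; ring)
    · -- no cut
      exact ih bboxes texts cap (pre ++ [cum]) (i + 1) s (cum + PySem.Str.len t) off
        cuts (eft ++ [t]) (efb ++ [bboxes[i]])
        hd1 (by omega) hb (by omega) (by simp [hpre])
        (by rw [hbs]; simp [tailStarts])
        (by rw [heft]; exact take_snoc texts s i t rest hs hdrop)
        (by rw [hefb]; exact take_snoc bboxes s i bboxes[i] (bboxes.drop (i+1)) hs
              (List.drop_eq_getElem_cons hilb))
        (by rw [len_join_append, hfl]; ring)

-- ===== VERDICT (by name: the statement is the Claim_ definition above) =====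
theorem split_for_ellm_spec : Claim_equal_split_for_ellm := by
  intro bboxes texts schema msl _ hpre
  unfold Spec_split_for_ellm split_for_ellm split_for_ellm_alt
  have h := loop_eq texts bboxes texts
    (msl - (PySem.List.max? (schema.map (fun k => PySem.Str.len k)) (fun y => y)).getD 0 - 4)
    [] 0 0 0 0 [] [] []
    (by simp) (by simp) hpre.2 (le_refl 0) rfl
    (by simpa using aStarts_eq texts) (by simp) (by simp)
    (by simp [PySem.Str.len_eq, PySem.Str.toList_join, PySem.Chars.join, List.intercalate])
  simpa using h
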